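-- pv_equiv track=rewrite | github.com/dmitri-mamrukov/coursera-data-structures-and-algorithms | course4-strings/assignments/assignment_002_inverse_burrows_wheeler_transform/inverse_burrows_wheeler_transform.py | _enumerate_word
-- ===== SOURCE A (Python) =====
-- def _enumerate_word(word):
--     """
--     Enumerates the same characters in the order of their appearance in
--     the given word.
--
--     For example,
--
--     'abcbba' returns ['a0', 'b0', 'c0', 'b1', 'b2', 'a1']
--     """
--
--     char_count = {}
--     enumerated_cars = []
--
--     for ch in word:
--         if ch not in char_count:
--             char_count[ch] = 0
--         else:
--             char_count[ch] += 1
--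
--         enumerated_cars.append(ch + str(char_count[ch]))
--
--     return enumerated_cars
-- ===== SOURCE B (Python) =====
-- def _enumerate_word(word):
--     """Each character paired with its occurrence rank so far, by prefix counting."""
--     return [ch + str(word[:i].count(ch)) for i, ch in enumerate(word)]
-- ===== Notes on version B (the rewrite author's own statement) =====
-- stated objective: simpler
-- what changed: Replaces the stateful counter-dict loop by a stateless one-line comprehension that computes each character's rank as its count in the preceding prefix word[:i].
import Mathlib
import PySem

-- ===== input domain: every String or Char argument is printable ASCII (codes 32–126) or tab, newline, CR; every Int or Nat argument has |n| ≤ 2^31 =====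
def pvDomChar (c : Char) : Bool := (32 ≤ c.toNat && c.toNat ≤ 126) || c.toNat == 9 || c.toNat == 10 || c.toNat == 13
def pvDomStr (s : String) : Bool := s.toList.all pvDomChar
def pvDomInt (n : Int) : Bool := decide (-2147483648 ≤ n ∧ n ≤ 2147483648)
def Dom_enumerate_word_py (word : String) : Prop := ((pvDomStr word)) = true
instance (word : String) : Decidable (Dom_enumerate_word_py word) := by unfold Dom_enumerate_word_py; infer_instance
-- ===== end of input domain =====

-- B replaces A's stateful counter-dict loop by a stateless per-index prefix count (simpler, not faster).

-- ===== PORT A =====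
-- loop body: (char_count dict, enumerated_cars accumulator); branches in Python's order
def stepA (st : PySem.Dict Char Int × List String) (ch : Char) : PySem.Dict Char Int × List String :=
  let d' := if st.1.contains ch = false then st.1.insert ch 0
            else st.1.modify ch 0 (· + 1)       -- char_count[ch] += 1 (key present)
  (d', st.2 ++ [String.ofList [ch] ++ PySem.Int.toStr (d'.getD ch 0)])

def enumerate_word_py (word : String) : List String :=
  (word.toList.foldl stepA (PySem.Dict.empty, [])).2

-- ===== PORT B =====
-- word[:i].count(ch): the slice is ported on List Char; a single-character substring count equals the character count, exact here
def enumerate_word_py_alt (word : String) : List String :=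
  (PySem.List.enumerate word.toList).map
    (fun p => String.ofList [p.2] ++ PySem.Int.toStr ((PySem.List.slice word.toList none (some p.1)).count p.2 : Int))

-- ===== PRECONDITION & SPEC =====
def Spec_enumerate_word_py (word : String) (out : List String) : Prop := out = enumerate_word_py_alt word
instance (word : String) (out : List String) : Decidable (Spec_enumerate_word_py word out) := by unfold Spec_enumerate_word_py; infer_instance

-- ===== CLAIM (what is proved, stated in full; the proofs are below) =====
def Claim_equal_enumerate_word_py : Prop := ∀ (word : String), Dom_enumerate_word_py word → Spec_enumerate_word_py word (enumerate_word_py word)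

-- ===== LEMMAS AND PROOFS =====

-- reference: the enumeration of `suf` given the already-processed prefix `pre`
def gSpec : List Char → List Char → List String
  | _, [] => []
  | pre, c :: t => (String.ofList [c] ++ PySem.Int.toStr (pre.count c)) :: gSpec (pre ++ [c]) t

lemma A_aux (suf : List Char) : ∀ (pre : List Char) (d : PySem.Dict Char Int) (acc : List String),
    (∀ c, d.contains c = decide (0 < pre.count c)) →
    (∀ c, d.getD c 0 = if 0 < pre.count c then (pre.count c : Int) - 1 else 0) →
    (suf.foldl stepA (d, acc)).2 = acc ++ gSpec pre suf := by
  induction suf with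
  | nil => intro pre d acc _ _; simp [gSpec]
  | cons c t ih =>
    intro pre d acc hcon hgetD
    rw [List.foldl_cons]
    by_cases h : d.contains c = false
    · -- c unseen: pre.count c = 0, branch inserts 0
      have hc0 : pre.count c = 0 := by
        have := hcon c
        rw [h] at this
        by_contra hne
        simp [Nat.pos_of_ne_zero hne] at this
      have hstep : stepA (d, acc) c =
          (d.insert c 0, acc ++ [String.ofList [c] ++ PySem.Int.toStr ((d.insert c 0).getD c 0)]) := by
        simp [stepA, h]
      have hA : ∀ c', (d.insert c 0).contains c' = decide (0 < (pre ++ [c]).count c') := by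
        intro c'
        rw [PySem.Dict.contains_insert, hcon c']
        by_cases hcc : c' = c
        · subst hcc; simp [List.count_append]
        · simp [hcc, List.count_append, (by simpa [eq_comm] using hcc : ¬ c = c')]
      have hB : ∀ c', (d.insert c 0).getD c' 0 =
          if 0 < (pre ++ [c]).count c' then ((pre ++ [c]).count c' : Int) - 1 else 0 := by
        intro c'
        by_cases hcc : c' = c
        · subst hcc
          rw [PySem.Dict.getD_insert_self]
          simp [List.count_append, hc0]
        · rw [PySem.Dict.getD_insert_of_ne d 0 0 hcc, hgetD c']
          simp [List.count_append, (by simpa [eq_comm] using hcc : ¬ c = c')]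
      rw [hstep, ih (pre ++ [c]) (d.insert c 0) _ hA hB]
      have h0 : (d.insert c 0).getD c 0 = 0 := PySem.Dict.getD_insert_self d c 0 0
      simp [gSpec, h0, hc0]
    · -- c seen: 0 < pre.count c, branch increments
      rw [Bool.not_eq_false] at h
      have hpos : 0 < pre.count c := by
        have := hcon c
        rw [h] at this
        exact of_decide_eq_true this.symm
      have hstep : stepA (d, acc) c =
          (d.modify c 0 (· + 1),
           acc ++ [String.ofList [c] ++ PySem.Int.toStr ((d.modify c 0 (· + 1)).getD c 0)]) := by
        simp [stepA, h]
      have hA : ∀ c', (d.modify c 0 (· + 1)).contains c' = decide (0 < (pre ++ [c]).count c') := by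
        intro c'
        rw [PySem.Dict.contains_modify, hcon c']
        by_cases hcc : c' = c
        · subst hcc; simp [List.count_append, hpos]
        · simp [hcc, List.count_append, (by simpa [eq_comm] using hcc : ¬ c = c')]
      have hB : ∀ c', (d.modify c 0 (· + 1)).getD c' 0 =
          if 0 < (pre ++ [c]).count c' then ((pre ++ [c]).count c' : Int) - 1 else 0 := by
        intro c'
        rw [PySem.Dict.getD_modify]
        by_cases hcc : c' = c
        · subst hcc
          rw [if_pos rfl, hgetD, if_pos hpos]
          simp [List.count_append]
        · rw [if_neg hcc, hgetD c']
          simp [List.count_append, (by simpa [eq_comm] using hcc : ¬ c = c')]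
      rw [hstep, ih (pre ++ [c]) (d.modify c 0 (· + 1)) _ hA hB]
      have h1 : (d.modify c 0 (· + 1)).getD c 0 = d.getD c 0 + 1 :=
        PySem.Dict.getD_modify_self d c 0 _
      rw [h1, hgetD c, if_pos hpos]
      have h2 : ((pre.count c : Int) - 1) + 1 = (pre.count c : Int) := by ring
      rw [h2]
      simp [gSpec]

lemma B_aux (suf : List Char) : ∀ (pre cs : List Char), cs = pre ++ suf →
    (PySem.List.enumerate suf (pre.length : Int)).map
      (fun p => String.ofList [p.2] ++ PySem.Int.toStr ((PySem.List.slice cs none (some p.1)).count p.2 : Int))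
      = gSpec pre suf := by
  induction suf with
  | nil => intro pre cs _; simp [PySem.List.enumerate, gSpec]
  | cons c t ih =>
    intro pre cs hcs
    rw [PySem.List.enumerate_cons]
    simp only [List.map_cons]
    rw [PySem.List.slice_to_natCast, hcs, List.take_left]
    have h1 : ((pre.length : Int) + 1) = (((pre ++ [c]).length : Nat) : Int) := by simp
    rw [h1, ih (pre ++ [c]) (pre ++ c :: t) (by simp)]
    simp [gSpec]

-- ===== VERDICT (by name: the statement is the Claim_ definition above) =====
theorem enumerate_word_py_spec : Claim_equal_enumerate_word_py := by
  intro word _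
  unfold Spec_enumerate_word_py enumerate_word_py enumerate_word_py_alt
  rw [A_aux word.toList [] PySem.Dict.empty [] (by intro c; simp [PySem.Dict.contains, PySem.Dict.empty])
        (by intro c; simp [PySem.Dict.getD, PySem.Dict.get?, PySem.Dict.empty])]
  rw [show (0 : Int) = (([] : List Char).length : Int) by simp] at *
  rw [B_aux word.toList [] word.toList (by simp)]
  simp
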